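-- pv_equiv track=rewrite | github.com/singularity0/Python_101 | week1/warmup.py | next_hack
-- ===== SOURCE A (Python) =====
-- def palindrome(obj):
-- 	obj = str(obj)
-- 	for i in range(0, len(obj)//2):
-- 		if obj[i] != obj[(len(obj))-1-i]:
--
-- 			return False
-- 	return True
--
-- def next_hack(n):
-- 	number = ''
-- 	counter1s = 0
-- 	is_odd = True
-- 	n_val = n
-- 	while n > 0:
-- 		number = str(n % 2) + number
-- 		n = n//2
-- 	for i in number:
-- 		if i == '1':
-- 			counter1s += 1
-- 	if (counter1s % 2) == 0:
-- 		is_odd = False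
-- 	return is_odd and palindrome(number)
-- ===== SOURCE B (Python) =====
-- def next_hack(n):
--     ones = 0
--     rev = 0
--     t = n
--     while t > 0:
--         b = t % 2
--         ones += b
--         rev = rev * 2 + b
--         t //= 2
--     return ones % 2 == 1 and rev == n
-- ===== Notes on version B (the rewrite author's own statement) =====
-- stated objective: alternative
-- what changed: B replaces A's binary-string construction, character '1'-count and two-pointer palindrome scan with a single arithmetic loop accumulating the popcount and the bit-reversed value, testing palindromicity as rev == n.
import Mathlib
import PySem

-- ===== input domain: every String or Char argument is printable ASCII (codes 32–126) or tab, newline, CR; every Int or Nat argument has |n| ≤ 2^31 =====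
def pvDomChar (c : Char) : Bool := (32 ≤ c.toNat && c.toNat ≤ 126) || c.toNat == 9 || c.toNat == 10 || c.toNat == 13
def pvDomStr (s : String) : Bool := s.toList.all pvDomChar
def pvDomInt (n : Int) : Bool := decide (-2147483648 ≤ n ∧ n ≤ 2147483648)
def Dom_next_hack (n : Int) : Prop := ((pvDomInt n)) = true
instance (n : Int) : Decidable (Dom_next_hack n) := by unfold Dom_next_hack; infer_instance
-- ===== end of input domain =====

-- B replaces A's binary-string build, char '1'-count and two-pointer palindrome scan by one
-- arithmetic loop accumulating the popcount and the bit-reversed value (alternative, same cost).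


-- ===== PORT A =====
-- helper `palindrome`: the for-loop with early return; the indices i and len-1-i are
-- always in range (0 ≤ i < len//2 ≤ len), so getD is exact for Python's obj[i] here.
def pvPalindromeLoop (obj : List Char) : List Nat → Bool
  | [] => true
  | i :: rest =>
      if obj.getD i ' ' != obj.getD (obj.length - 1 - i) ' ' then false
      else pvPalindromeLoop obj rest

def pvPalindrome (obj : List Char) : Bool :=
  pvPalindromeLoop obj (List.range (obj.length / 2))

-- the while loop of next_hack: number = str(n % 2) + number; n = n // 2
def pvBuildNumber (n : Int) (number : List Char) : List Char :=
  if _h : n > 0 then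
    pvBuildNumber (PySem.Int.floordiv n 2) ((PySem.Int.toStr (PySem.Int.mod n 2)).toList ++ number)
  else number
termination_by n.toNat
decreasing_by
  rw [PySem.Int.floordiv_eq_ediv_of_pos (by omega)]
  omega

def next_hack (n : Int) : Bool :=
  let number := pvBuildNumber n []
  let counter1s := number.foldl (fun c i => if i == '1' then c + 1 else c) (0 : Int)
  let is_odd := if PySem.Int.mod counter1s 2 == 0 then false else true
  is_odd && pvPalindrome number

-- ===== PORT B =====
-- the while loop of Source B: b = t % 2; ones += b; rev = rev*2 + b; t //= 2
def pvAltLoop (t ones rev : Int) : Int × Int :=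
  if _h : t > 0 then
    pvAltLoop (PySem.Int.floordiv t 2) (ones + PySem.Int.mod t 2) (rev * 2 + PySem.Int.mod t 2)
  else (ones, rev)
termination_by t.toNat
decreasing_by
  rw [PySem.Int.floordiv_eq_ediv_of_pos (by omega)]
  omega

def next_hack_alt (n : Int) : Bool :=
  let p := pvAltLoop n 0 0
  (PySem.Int.mod p.1 2 == 1) && (p.2 == n)

-- ===== PRECONDITION & SPEC =====
def Spec_next_hack (n : Int) (out : Bool) : Prop := out = next_hack_alt n
instance (n : Int) (out : Bool) : Decidable (Spec_next_hack n out) := by unfold Spec_next_hack; infer_instance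

-- ===== CLAIM (what is proved, stated in full; the proofs are below) =====
def Claim_equal_next_hack : Prop := ∀ (n : Int), Dom_next_hack n → Spec_next_hack n (next_hack n)

-- ===== LEMMAS AND PROOFS =====

-- binary digits of n, least significant first (empty for n ≤ 0)
def pvBits (n : Int) : List Int :=
  if _h : n > 0 then PySem.Int.mod n 2 :: pvBits (PySem.Int.floordiv n 2) else []
termination_by n.toNat
decreasing_by
  rw [PySem.Int.floordiv_eq_ediv_of_pos (by omega)]
  omega

def pvDigit (b : Int) : Char := if b == 1 then '1' else '0'

-- value of a bit list, least significant bit first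
def pvValL : List Int → Int
  | [] => 0
  | b :: l => b + 2 * pvValL l

-- value of a bit list, most significant bit first (B's rev accumulator)
def pvValM (l : List Int) : Int := l.foldl (fun a b => a * 2 + b) 0

def pvBits01 (l : List Int) : Prop := ∀ b ∈ l, b = 0 ∨ b = 1

theorem pvBits01_bits (n : Int) : pvBits01 (pvBits n) := by
  fun_induction pvBits n with
  | case1 n h ih =>
    intro b hb
    rw [List.mem_cons] at hb
    rcases hb with rfl | hb
    · rw [PySem.Int.mod_eq_emod_of_pos (by omega)]; omega
    · exact ih b hb
  | case2 n h => intro b hb; simp at hb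

theorem pvValL_bits (n : Int) : 0 < n → pvValL (pvBits n) = n := by
  fun_induction pvBits n with
  | case1 n h ih =>
    intro _
    have hm := PySem.Int.floordiv_mul_add_mod n 2
    rw [PySem.Int.floordiv_eq_ediv_of_pos (by omega), PySem.Int.mod_eq_emod_of_pos (by omega)] at *
    rw [pvValL]
    by_cases h2 : 0 < n / 2
    · rw [ih h2]; omega
    · have h0 : n / 2 = 0 := by omega
      rw [h0]
      have : pvBits 0 = [] := by rw [pvBits]; simp
      rw [this, pvValL]
      omega
  | case2 n h => intro hn; omega

theorem pvBuild_eq (n : Int) (acc : List Char) :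
    pvBuildNumber n acc = (pvBits n).reverse.map pvDigit ++ acc := by
  fun_induction pvBuildNumber n acc with
  | case1 n acc h ih =>
    have hd : (PySem.Int.toStr (PySem.Int.mod n 2)).toList = [pvDigit (PySem.Int.mod n 2)] := by
      have hm : PySem.Int.mod n 2 = 0 ∨ PySem.Int.mod n 2 = 1 := by
        rw [PySem.Int.mod_eq_emod_of_pos (by omega)]; omega
      rcases hm with hm | hm <;> rw [hm] <;> decide
    have hb : pvBits n = PySem.Int.mod n 2 :: pvBits (PySem.Int.floordiv n 2) := by
      rw [pvBits]; simp [h]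
    rw [ih, hd, hb]
    simp
  | case2 n acc h =>
    rw [pvBits]
    simp [h]

theorem pvValM_foldl (l : List Int) (a : Int) :
    l.foldl (fun a b => a * 2 + b) a = a * 2 ^ l.length + pvValM l := by
  induction l generalizing a with
  | nil => simp [pvValM]
  | cons b l ih =>
    simp only [List.foldl_cons, List.length_cons, pvValM]
    rw [ih (a * 2 + b), ih (0 * 2 + b), pow_succ]
    simp only [pvValM]
    ring

theorem pvValM_cons (b : Int) (l : List Int) : pvValM (b :: l) = b * 2 ^ l.length + pvValM l := by
  simp only [pvValM, List.foldl_cons]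
  rw [pvValM_foldl l (0 * 2 + b)]
  simp only [pvValM]
  ring

theorem pvAltLoop_eq (t ones rev : Int) :
    pvAltLoop t ones rev =
      (ones + (pvBits t).sum, rev * 2 ^ (pvBits t).length + pvValM (pvBits t)) := by
  fun_induction pvAltLoop t ones rev with
  | case1 t ones rev h ih =>
    have hb : pvBits t = PySem.Int.mod t 2 :: pvBits (PySem.Int.floordiv t 2) := by
      rw [pvBits]; simp [h]
    rw [ih, hb]
    simp only [List.sum_cons, List.length_cons, pvValM_cons]
    refine Prod.ext ?_ ?_ <;> simp <;> ring
  | case2 t ones rev h =>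
    have hb : pvBits t = [] := by rw [pvBits]; simp [h]
    simp [hb, pvValM]

theorem pvValM_reverse (l : List Int) : pvValM l.reverse = pvValL l := by
  induction l with
  | nil => simp [pvValM, pvValL]
  | cons b l ih =>
    simp only [List.reverse_cons, pvValM, List.foldl_append, List.foldl_cons, List.foldl_nil, pvValL]
    rw [show (List.foldl (fun a b => a * 2 + b) 0 l.reverse) = pvValM l.reverse from rfl, ih]
    ring

theorem pvValM_bounds (l : List Int) (h : pvBits01 l) :
    0 ≤ pvValM l ∧ pvValM l < 2 ^ l.length := by
  induction l with
  | nil => simp [pvValM]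
  | cons b l ih =>
    have hb := h b (List.mem_cons_self ..)
    have ih' := ih (fun x hx => h x (List.mem_cons_of_mem _ hx))
    have hp : (0:Int) < 2 ^ l.length := by positivity
    rw [pvValM_cons, List.length_cons, pow_succ]
    rcases hb with rfl | rfl <;> omega

theorem pvValM_inj (l1 : List Int) : ∀ (l2 : List Int), l1.length = l2.length →
    pvBits01 l1 → pvBits01 l2 → pvValM l1 = pvValM l2 → l1 = l2 := by
  induction l1 with
  | nil => intro l2 hl _ _ _; exact (List.eq_nil_of_length_eq_zero hl.symm).symm
  | cons a l1 ih =>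
    intro l2 hl h1 h2 hv
    cases l2 with
    | nil => simp at hl
    | cons b l2 =>
      have ha := h1 a (List.mem_cons_self ..)
      have hb := h2 b (List.mem_cons_self ..)
      have h1' : pvBits01 l1 := fun x hx => h1 x (List.mem_cons_of_mem _ hx)
      have h2' : pvBits01 l2 := fun x hx => h2 x (List.mem_cons_of_mem _ hx)
      have hlen : l1.length = l2.length := by simpa using hl
      have b1 := pvValM_bounds l1 h1'
      have b2 := pvValM_bounds l2 h2'
      rw [pvValM_cons, pvValM_cons, hlen] at hv
      have hp : (0:Int) < 2 ^ l2.length := by positivity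
      rw [hlen] at b1
      have hab : a = b := by rcases ha with rfl | rfl <;> rcases hb with rfl | rfl <;> omega
      subst hab
      have : pvValM l1 = pvValM l2 := by omega
      rw [ih l2 hlen h1' h2' this]

theorem pvMapDigit_inj (l1 : List Int) : ∀ (l2 : List Int), pvBits01 l1 → pvBits01 l2 →
    l1.map pvDigit = l2.map pvDigit → l1 = l2 := by
  induction l1 with
  | nil => intro l2 _ _ h; simpa using (List.map_eq_nil_iff.mp h.symm).symm
  | cons a l1 ih =>
    intro l2 h1 h2 h
    cases l2 with
    | nil => simp at h
    | cons b l2 =>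
      simp only [List.map_cons, List.cons.injEq] at h
      have ha := h1 a (List.mem_cons_self ..)
      have hb := h2 b (List.mem_cons_self ..)
      have hab : a = b := by
        rcases ha with rfl | rfl <;> rcases hb with rfl | rfl <;> simp [pvDigit] at h <;> omega
      rw [hab, ih l2 (fun x hx => h1 x (List.mem_cons_of_mem _ hx))
        (fun x hx => h2 x (List.mem_cons_of_mem _ hx)) h.2]

theorem pvCnt_foldl (l : List Char) (c : Int) :
    l.foldl (fun c i => if i == '1' then c + 1 else c) c
      = c + l.foldl (fun c i => if i == '1' then c + 1 else c) 0 := by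
  induction l generalizing c with
  | nil => simp
  | cons x l ih =>
    simp only [List.foldl_cons]
    rw [ih (if x == '1' then c + 1 else c), ih (if x == '1' then (0:Int) + 1 else 0)]
    split <;> ring

theorem pvCnt_eq (l : List Int) (h : pvBits01 l) :
    (l.map pvDigit).foldl (fun c i => if i == '1' then c + 1 else c) (0 : Int) = l.sum := by
  induction l with
  | nil => simp
  | cons b l ih =>
    have hb := h b (List.mem_cons_self ..)
    simp only [List.map_cons, List.foldl_cons, List.sum_cons]
    rw [pvCnt_foldl, ih (fun x hx => h x (List.mem_cons_of_mem _ hx))]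
    rcases hb with rfl | rfl <;> simp [pvDigit]

theorem pvPalLoop_all (obj : List Char) (is : List Nat) :
    pvPalindromeLoop obj is
      = is.all (fun i => obj.getD i ' ' == obj.getD (obj.length - 1 - i) ' ') := by
  induction is with
  | nil => rfl
  | cons i rest ih =>
    rw [pvPalindromeLoop, List.all_cons, ih]
    by_cases h : obj.getD i ' ' == obj.getD (obj.length - 1 - i) ' ' <;> simp_all

theorem pvPalindrome_iff (l : List Char) : pvPalindrome l = true ↔ l.reverse = l := by
  rw [pvPalindrome, pvPalLoop_all, List.all_eq_true]
  constructor
  · intro hall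
    have key : ∀ i, ∀ hi : i < l.length, l[i]'(by omega) = l[l.length - 1 - i]'(by omega) := by
      intro i hi
      have get : ∀ j, (hj : j < l.length / 2) → l[j]'(by omega) = l[l.length - 1 - j]'(by omega) := by
        intro j hj
        have := hall j (List.mem_range.mpr hj)
        simp only [beq_iff_eq] at this
        rwa [List.getD_eq_getElem l ' ' (by omega), List.getD_eq_getElem l ' ' (by omega)] at this
      by_cases hc : i < l.length / 2
      · exact get i hc
      · by_cases hc2 : l.length - 1 - i < l.length / 2
        · have := (get (l.length - 1 - i) hc2).symm
          have he : l.length - 1 - (l.length - 1 - i) = i := by omega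
          simp_rw [he] at this
          exact this
        · have : l.length - 1 - i = i := by omega
          simp_rw [this]
    apply List.ext_getElem (by simp)
    intro i h1 h2
    rw [List.getElem_reverse]
    exact (key (l.length - 1 - i) (by omega)).trans (by congr 1; omega)
  · intro hrev i hmem
    have hi := List.mem_range.mp hmem
    have h1 : i < l.length := by omega
    have h2 : l.length - 1 - i < l.length := by omega
    rw [List.getD_eq_getElem l ' ' h1, List.getD_eq_getElem l ' ' h2, beq_iff_eq]
    have h3 := List.getElem_of_eq hrev (i := i) (by simpa using h1)
    rw [List.getElem_reverse] at h3
    exact h3.symm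

theorem pvBool_ext (a b : Bool) (h : a = true ↔ b = true) : a = b := by
  cases a <;> cases b <;> simp_all

theorem pvSum_nonneg (l : List Int) (h : pvBits01 l) : 0 ≤ l.sum := by
  induction l with
  | nil => simp
  | cons b l ih =>
    have hb := h b (List.mem_cons_self ..)
    have := ih (fun x hx => h x (List.mem_cons_of_mem _ hx))
    simp only [List.sum_cons]
    omega

theorem next_hack_eq_alt (n : Int) : next_hack n = next_hack_alt n := by
  unfold next_hack next_hack_alt
  rw [pvBuild_eq, pvAltLoop_eq]
  simp only [List.append_nil, zero_add, zero_mul]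
  by_cases hn : 0 < n
  · have h01 := pvBits01_bits n
    have h01r : pvBits01 (pvBits n).reverse := fun b hb => h01 b (List.mem_reverse.mp hb)
    rw [pvCnt_eq _ h01r, List.sum_reverse]
    congr 1
    · have hs := pvSum_nonneg _ h01
      rw [PySem.Int.mod_eq_emod_of_pos (by norm_num)]
      have : (pvBits n).sum % 2 = 0 ∨ (pvBits n).sum % 2 = 1 := by omega
      rcases this with h | h <;> simp [h]
    · apply pvBool_ext
      rw [pvPalindrome_iff, beq_iff_eq]
      have hmr : ((pvBits n).reverse.map pvDigit).reverse = (pvBits n).map pvDigit := by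
        rw [← List.map_reverse, List.reverse_reverse]
      rw [hmr]
      constructor
      · intro h
        have hLL : (pvBits n) = (pvBits n).reverse := pvMapDigit_inj _ _ h01 h01r h
        calc pvValM (pvBits n) = pvValM (pvBits n).reverse := by rw [← hLL]
          _ = pvValL (pvBits n) := pvValM_reverse _
          _ = n := pvValL_bits n hn
      · intro h
        have hv : pvValM (pvBits n).reverse = pvValM (pvBits n) := by
          rw [pvValM_reverse, pvValL_bits n hn, h]
        have := pvValM_inj _ _ (by simp) h01 h01r hv.symm
        rw [← this]
  · have hb : pvBits n = [] := by rw [pvBits]; simp; omega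
    simp [hb, pvValM]

-- ===== VERDICT (by name: the statement is the Claim_ definition above) =====
theorem next_hack_spec : Claim_equal_next_hack := by
  intro n _
  exact next_hack_eq_alt n
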